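-- pv_equiv track=rewrite | github.com/thin2/work2025_5 | 13/task5.py | clean_and_slide_columns
-- ===== SOURCE A (Python) =====
-- def clean_and_slide_columns(board):
--     """
--     Slide down the columns and fill empty spots with blank or '#'.
--     """
--     new_board = [row[:] for row in board]
--     rows = len(board)
--     columns = len(board[0])
--
--     for column in range(columns):
--         column_chars = [board[row][column] for row in range(rows)]
--         non_blank = [char for char in column_chars if char not in ['', ' ']]
--         padded = [''] * (rows - len(non_blank)) + non_blank
--         for row in range(rows):
--             new_board[row][column] = padded[row]
--
--     return new_board
-- ===== SOURCE B (Python) =====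
-- def clean_and_slide_columns(board):
--     """
--     Slide down the columns and fill empty spots with blank or '#'.
--     Bottom-up in-place sweep with a write pointer per column.
--     """
--     new_board = [row[:] for row in board]
--     rows = len(board)
--     columns = len(board[0])
--
--     for column in range(columns):
--         write = rows - 1
--         for row in range(rows - 1, -1, -1):
--             ch = board[row][column]
--             if ch != '' and ch != ' ':
--                 new_board[write][column] = ch
--                 write -= 1
--         for row in range(write + 1):
--             new_board[row][column] = ''
--
--     return new_board
-- ===== Notes on version B (the rewrite author's own statement) =====
-- stated objective: alternative
-- what changed: Replaces per-column extract/filter/pad list construction with an in-place bottom-up sweep: a write pointer per column copies non-blank cells downward and the rows above it are blanked, so no intermediate column/padded lists are built.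
import Mathlib
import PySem

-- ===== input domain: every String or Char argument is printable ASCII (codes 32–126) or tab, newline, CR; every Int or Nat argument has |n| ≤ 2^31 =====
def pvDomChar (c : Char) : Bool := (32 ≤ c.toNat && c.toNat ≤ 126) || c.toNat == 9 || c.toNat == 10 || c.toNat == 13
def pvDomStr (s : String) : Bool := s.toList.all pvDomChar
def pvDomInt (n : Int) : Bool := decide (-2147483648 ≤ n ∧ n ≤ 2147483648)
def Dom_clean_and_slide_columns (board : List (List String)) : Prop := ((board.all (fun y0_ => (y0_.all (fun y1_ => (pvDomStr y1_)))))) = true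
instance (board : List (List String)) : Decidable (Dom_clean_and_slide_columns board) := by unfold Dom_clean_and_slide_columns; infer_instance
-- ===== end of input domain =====

-- B replaces A's per-column extract/filter/pad construction by an in-place bottom-up
-- write-pointer sweep per column (alternative decomposition, same asymptotic cost).


-- ===== PORT A =====
-- literal port of A: per column, read the column out of `board`, filter the blanks,
-- left-pad with "" and write the padded column back (the row-by-row assignment loop
-- becomes a zipWith of List.set over the rows; reads board[row][column] → getD, exact under Pre_).
def clean_and_slide_columns (board : List (List String)) : List (List String) :=
  let rows := board.length
  let columns := (board.headD []).length
  (List.range columns).foldl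
    (fun new_board column =>
      let column_chars := board.map (fun row => row.getD column "")
      let non_blank := column_chars.filter (fun ch => !(ch == "" || ch == " "))
      let padded := List.replicate (rows - non_blank.length) "" ++ non_blank
      List.zipWith (fun row p => row.set column p) new_board padded)
    board

-- ===== PORT B =====
-- port of B (Source B): new_board[r][c] = v
def pvWriteCell (nb : List (List String)) (r : Nat) (c : Nat) (v : String) : List (List String) :=
  nb.modify r (fun row => row.set c v)

-- one column of B: bottom-up scan with an Int write pointer, then blank the rows above it
def pvSlideColumn (board : List (List String)) (nb : List (List String)) (c : Nat) : List (List String) :=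
  let rows := board.length
  let st := board.reverse.foldl
    (fun (st : List (List String) × Int) row =>
      let ch := row.getD c ""
      if ch == "" || ch == " " then st
      else (pvWriteCell st.1 st.2.toNat c ch, st.2 - 1))
    (nb, (rows : Int) - 1)
  (List.range (st.2 + 1).toNat).foldl (fun m r => pvWriteCell m r c "") st.1

def clean_and_slide_columns_alt (board : List (List String)) : List (List String) :=
  let columns := (board.headD []).length
  (List.range columns).foldl (pvSlideColumn board) board

-- ===== PRECONDITION & SPEC =====
-- exactly the inputs where Python A returns: board nonempty (board[0]) and every row
-- at least as long as row 0 (board[row][column] for column < len(board[0]))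
def Pre_clean_and_slide_columns (board : List (List String)) : Prop :=
  board ≠ [] ∧ ∀ row ∈ board, (board.headD []).length ≤ row.length
instance (board : List (List String)) : Decidable (Pre_clean_and_slide_columns board) := by
  unfold Pre_clean_and_slide_columns; infer_instance
def pvWitness_clean_and_slide_columns : List (List String) := [["x", ""], [" ", "y"]]

def Spec_clean_and_slide_columns (board : List (List String)) (out : List (List String)) : Prop := out = clean_and_slide_columns_alt board
instance (board : List (List String)) (out : List (List String)) : Decidable (Spec_clean_and_slide_columns board out) := by unfold Spec_clean_and_slide_columns; infer_instance

-- ===== CLAIM (what is proved, stated in full; the proofs are below) =====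
def Claim_equal_clean_and_slide_columns : Prop := ∀ (board : List (List String)), Dom_clean_and_slide_columns board → Pre_clean_and_slide_columns board → Spec_clean_and_slide_columns board (clean_and_slide_columns board)

-- ===== LEMMAS AND PROOFS =====

def pvBlank (s : String) : Bool := s == "" || s == " "

-- phase 1 of B's column sweep, as a fold over the (reversed) column values
def pvPhase1 (c : Nat) (st : List (List String) × Int) (vals : List String) :
    List (List String) × Int :=
  vals.foldl
    (fun st ch => if pvBlank ch then st else (pvWriteCell st.1 st.2.toNat c ch, st.2 - 1))
    st

theorem pvPhase1_snd (c : Nat) (vals : List String) (nb : List (List String)) (w : Int) :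
    (pvPhase1 c (nb, w) vals).2 = w - (vals.filter (fun ch => !(pvBlank ch))).length := by
  induction vals generalizing nb w with
  | nil => simp [pvPhase1]
  | cons v vs ih =>
    cases h : pvBlank v with
    | true => simpa [pvPhase1, h] using ih nb w
    | false =>
      have := ih (pvWriteCell nb w.toNat c v) (w - 1)
      simp only [pvPhase1, List.foldl_cons, List.filter_cons, h] at this ⊢
      rw [if_neg (by simp), this]
      simp; omega

theorem pvPhase1_getElem (c : Nat) (vals : List String) (nb : List (List String)) (w : Int)
    (hk : ((vals.filter (fun ch => !(pvBlank ch))).length : Int) ≤ w + 1) (r : Nat) :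
    (pvPhase1 c (nb, w) vals).1[r]? =
      (if w - (vals.filter (fun ch => !(pvBlank ch))).length < (r : Int) ∧ (r : Int) ≤ w then
        nb[r]?.map (fun row =>
          row.set c ((vals.filter (fun ch => !(pvBlank ch))).getD (w - r).toNat ""))
      else nb[r]?) := by
  induction vals generalizing nb w with
  | nil =>
    simp only [pvPhase1, List.foldl_nil, List.filter_nil, List.length_nil, Nat.cast_zero,
      Int.sub_zero]
    rw [if_neg (by omega)]
  | cons v vs ih =>
    cases h : pvBlank v with
    | true =>
      have := ih nb w (by simpa [List.filter_cons, h] using hk)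
      simpa [pvPhase1, List.filter_cons, h] using this
    | false =>
      have hk' : ((vs.filter (fun ch => !(pvBlank ch))).length : Int) ≤ (w - 1) + 1 := by
        simp only [List.filter_cons, h] at hk; simp at hk; omega
      have hw : 0 ≤ w := by
        have : (0:Int) ≤ (vs.filter (fun ch => !(pvBlank ch))).length := by positivity
        omega
      have hstep : (pvPhase1 c (nb, w) (v :: vs)).1[r]? =
          (pvPhase1 c (pvWriteCell nb w.toNat c v, w - 1) vs).1[r]? := by
        simp [pvPhase1, h]
      rw [hstep, ih (pvWriteCell nb w.toNat c v) (w - 1) hk']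
      have hnb' : (pvWriteCell nb w.toNat c v)[r]? =
          (if w.toNat = r then nb[r]?.map (fun row => row.set c v) else nb[r]?) := by
        simp only [pvWriteCell, List.getElem?_modify]
        cases nb[r]? <;> simp <;> (try split <;> simp)
      simp only [List.filter_cons, h, Bool.not_false, if_true, List.length_cons] at hk ⊢
      push_cast at hk
      by_cases h1 : (w - 1) - (vs.filter (fun ch => !(pvBlank ch))).length < (r : Int) ∧ (r : Int) ≤ w - 1
      · -- written later by a smaller position: r < w
        rw [if_pos h1, if_pos (by omega)]
        rw [hnb', if_neg (by omega)]
        have hidx : (w - (r:Int)).toNat = ((w - 1) - (r:Int)).toNat + 1 := by omega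
        rw [hidx, List.getD_cons_succ]
      · rw [if_neg h1, hnb']
        by_cases h2 : (r : Int) = w
        · rw [if_pos (by push_cast; omega), if_pos (by omega)]
          have : (w - (r:Int)).toNat = 0 := by omega
          rw [this]
          rfl
        · rw [if_neg (by omega), if_neg (by omega)]

def pvFill (c : Nat) (m : Nat) (nb : List (List String)) : List (List String) :=
  (List.range m).foldl (fun m' r => pvWriteCell m' r c "") nb

theorem pvFill_getElem (c : Nat) (m : Nat) (nb : List (List String)) (r : Nat) :
    (pvFill c m nb)[r]? =
      (if r < m then nb[r]?.map (fun row => row.set c "") else nb[r]?) := by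
  induction m with
  | zero => simp [pvFill]
  | succ m ih =>
    have hstep : pvFill c (m + 1) nb = pvWriteCell (pvFill c m nb) m c "" := by
      simp [pvFill, List.range_succ]
    rw [hstep]
    have : (pvWriteCell (pvFill c m nb) m c "")[r]? =
        (if m = r then (pvFill c m nb)[r]?.map (fun row => row.set c "") else (pvFill c m nb)[r]?) := by
      simp only [pvWriteCell, List.getElem?_modify]
      cases (pvFill c m nb)[r]? <;> simp <;> (try split <;> simp)
    rw [this]
    by_cases h : m = r
    · subst h
      rw [if_pos rfl, ih, if_neg (by omega), if_pos (by omega)]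
    · rw [if_neg h, ih]
      by_cases h2 : r < m
      · rw [if_pos h2, if_pos (by omega)]
      · rw [if_neg h2, if_neg (by omega)]

def pvPadded (board : List (List String)) (c : Nat) : List String :=
  let column_chars := board.map (fun row => row.getD c "")
  let non_blank := column_chars.filter (fun ch => !(ch == "" || ch == " "))
  List.replicate (board.length - non_blank.length) "" ++ non_blank

theorem pvSlideColumn_eq (board : List (List String)) (c : Nat) (nb : List (List String))
    (hlen : nb.length = board.length) :
    pvSlideColumn board nb c =
      List.zipWith (fun row p => row.set c p) nb (pvPadded board c) := by
  have hP : ∀ ch : String, (ch == "" || ch == " ") = pvBlank ch := fun ch => rfl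
  set rows := board.length with hrows
  set col := board.map (fun row => row.getD c "") with hcol
  have hcollen : col.length = rows := by rw [hcol, List.length_map, hrows]
  set nbk := col.filter (fun ch => !(pvBlank ch)) with hnbk
  have hkle : nbk.length ≤ rows := by
    rw [← hcollen]; exact List.length_filter_le _ _
  -- rewrite B's fold over rows into pvPhase1 over the reversed column values
  have hfold : pvSlideColumn board nb c =
      pvFill c ((pvPhase1 c (nb, (rows:Int) - 1) col.reverse).2 + 1).toNat
        (pvPhase1 c (nb, (rows:Int) - 1) col.reverse).1 := by
    simp only [pvSlideColumn, pvPhase1, pvFill, hcol, ← List.map_reverse, List.foldl_map, hP,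
      hrows]
  have hfl : col.reverse.filter (fun ch => !(pvBlank ch)) = nbk.reverse := by
    rw [hnbk, List.filter_reverse]
  have hfll : (col.reverse.filter (fun ch => !(pvBlank ch))).length = nbk.length := by
    rw [hfl, List.length_reverse]
  have hrevlen : nbk.reverse.length = nbk.length := List.length_reverse
  have hk : ((col.reverse.filter (fun ch => !(pvBlank ch))).length : Int) ≤ ((rows:Int) - 1) + 1 := by
    rw [hfl]; simp; omega
  have hsnd : (pvPhase1 c (nb, (rows:Int) - 1) col.reverse).2 = (rows:Int) - 1 - nbk.length := by
    rw [pvPhase1_snd, hfl]; simp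
  have hpadlen : (pvPadded board c).length = rows := by
    simp only [pvPadded, List.length_append, List.length_replicate, hP]
    rw [← hcol, ← hnbk]
    omega
  rw [hfold]
  apply List.ext_getElem?
  intro r
  rw [pvFill_getElem, pvPhase1_getElem c col.reverse nb ((rows:Int) - 1) hk r, hsnd, hfl]
  rw [List.getElem?_zipWith]
  have hfill : ((rows:Int) - 1 - nbk.length + 1).toNat = rows - nbk.length := by omega
  rw [hfill]
  by_cases hr : r < rows
  · have hnbr : nb[r]? = some (nb[r]'(by omega)) := List.getElem?_eq_getElem (by omega)
    by_cases hlow : r < rows - nbk.length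
    · -- blanked region
      rw [if_pos hlow, if_neg (by omega)]
      have hpadval : (pvPadded board c)[r]? = some "" := by
        simp only [pvPadded, List.getElem?_append, List.length_replicate, hP]
        rw [← hcol, ← hnbk]
        rw [if_pos (by omega), List.getElem?_replicate, if_pos (by omega)]
      rw [hpadval, hnbr]
      simp
    · -- slid region
      rw [if_neg hlow, if_pos (by constructor <;> omega)]
      have hidx : (((rows:Int) - 1) - (r:Int)).toNat = rows - 1 - r := by omega
      have hidxlt : rows - 1 - r < nbk.length := by omega
      have hrevgetD : nbk.reverse.getD (rows - 1 - r) "" = nbk.getD (r - (rows - nbk.length)) "" := by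
        rw [List.getD_eq_getElem?_getD, List.getD_eq_getElem?_getD]
        rw [List.getElem?_reverse (by omega)]
        have h3 : nbk.length - 1 - (rows - 1 - r) = r - (rows - nbk.length) := by omega
        rw [h3]
      have hpadval : (pvPadded board c)[r]? = some (nbk.getD (r - (rows - nbk.length)) "") := by
        simp only [pvPadded, List.getElem?_append, List.length_replicate, hP]
        rw [← hcol, ← hnbk]
        rw [if_neg (by omega)]
        rw [List.getD_eq_getElem?_getD]
        cases hx : nbk[r - (rows - nbk.length)]? with
        | none => exact absurd (List.getElem?_eq_none_iff.mp hx) (by omega)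
        | some v => rfl
      rw [hpadval, hnbr, hidx, hrevgetD]
      simp
  · have hnone : nb[r]? = none := List.getElem?_eq_none (by omega)
    have hpnone : (pvPadded board c)[r]? = none := List.getElem?_eq_none (by omega)
    rw [hnone, hpnone]
    split <;> split <;> simp

theorem pvOuter (board : List (List String)) (cs : List Nat) (nb : List (List String))
    (hlen : nb.length = board.length) :
    cs.foldl (pvSlideColumn board) nb =
      cs.foldl (fun nb c => List.zipWith (fun row p => row.set c p) nb (pvPadded board c)) nb := by
  induction cs generalizing nb with
  | nil => rfl
  | cons c cs ih =>
    simp only [List.foldl_cons]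
    rw [pvSlideColumn_eq board c nb hlen]
    apply ih
    rw [List.length_zipWith, hlen]
    have hk : ((board.map (fun row => row.getD c "")).filter (fun ch => !(ch == "" || ch == " "))).length ≤ board.length := by
      calc _ ≤ (board.map (fun row => row.getD c "")).length := List.length_filter_le _ _
        _ = board.length := by simp
    simp only [pvPadded, List.length_append, List.length_replicate]
    omega

theorem A_unfold (board : List (List String)) :
    clean_and_slide_columns board =
      (List.range (board.headD []).length).foldl
        (fun nb c => List.zipWith (fun row p => row.set c p) nb (pvPadded board c)) board := rfl

theorem B_unfold (board : List (List String)) :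
    clean_and_slide_columns_alt board =
      (List.range (board.headD []).length).foldl (pvSlideColumn board) board := rfl

-- ===== VERDICT (by name: the statement is the Claim_ definition above) =====
theorem clean_and_slide_columns_spec : Claim_equal_clean_and_slide_columns := by
  intro board _ _
  unfold Spec_clean_and_slide_columns
  rw [A_unfold, B_unfold, pvOuter board _ board rfl]
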